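-- pv_equiv track=rewrite | github.com/carolinaaaaa7/ATP2022 | TPC7/alunos.py | distribuicao
-- ===== SOURCE A (Python) =====
-- def distribuicao (lista, indice):
--     d={}
--     for linha in lista:
--         intervalo = "[ " + str(linha[indice]) + " ]"
--         if intervalo in d:
--             d[intervalo] += 1
--         else:
--             d[intervalo] = 1
--     d= dict(sorted(d.items()))
--     return d
-- ===== SOURCE B (Python) =====
-- def distribuicao(lista, indice):
--     chaves = sorted("[ " + str(linha[indice]) + " ]" for linha in lista)
--     d = {}
--     i, n = 0, len(chaves)
--     while i < n:
--         j = i + 1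
--         while j < n and chaves[j] == chaves[i]:
--             j += 1
--         d[chaves[i]] = j - i
--         i = j
--     return d
-- ===== Notes on version B (the rewrite author's own statement) =====
-- stated objective: alternative
-- what changed: B formats all keys first, sorts that list of strings, and builds the result dict in already-sorted order with a run-length grouping scan, instead of A's count-into-hash followed by sorting the dict items.
import Mathlib
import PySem

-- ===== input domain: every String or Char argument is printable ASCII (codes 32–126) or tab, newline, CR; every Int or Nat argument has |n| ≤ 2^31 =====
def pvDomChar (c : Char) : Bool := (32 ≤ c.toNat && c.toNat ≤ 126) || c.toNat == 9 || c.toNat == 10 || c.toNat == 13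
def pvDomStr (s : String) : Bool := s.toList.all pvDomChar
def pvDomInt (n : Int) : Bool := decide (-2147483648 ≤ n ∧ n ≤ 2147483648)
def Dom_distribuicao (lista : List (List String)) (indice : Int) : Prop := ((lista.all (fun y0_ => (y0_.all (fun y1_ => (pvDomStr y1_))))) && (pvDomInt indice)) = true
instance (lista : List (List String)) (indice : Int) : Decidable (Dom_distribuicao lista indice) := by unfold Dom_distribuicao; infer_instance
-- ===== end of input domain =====

-- B sorts the formatted keys first and builds the result dict in already-sorted order by a
-- run-length grouping scan, instead of A's count-into-hash followed by sorting the dict items;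
-- objective: alternative algorithm of similar cost.

-- ===== PORT A =====
def distribuicao (lista : List (List String)) (indice : Int) : List (String × Int) :=
  let d := lista.foldl
    (fun d linha =>
      let intervalo := "[ " ++ PySem.List.pyGetD linha indice "" ++ " ]"
      if d.contains intervalo then d.insert intervalo (d.getD intervalo 0 + 1)
      else d.insert intervalo 1)
    PySem.Dict.empty
  -- dict(sorted(d.items())): tuples compare lexicographically
  PySem.List.sorted2 d.items (fun p => p.1) (fun p => p.2) false

-- ===== PORT B =====
-- the inner `while j < n and chaves[j] == chaves[i]` scan is the takeWhile length; `i = j` is the drop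
def pvRuns : List String → PySem.Dict String Int → PySem.Dict String Int
  | [], d => d
  | k :: resto, d =>
    pvRuns (resto.drop ((resto.takeWhile (fun x => x == k)).length))
           (d.insert k (((resto.takeWhile (fun x => x == k)).length : Int) + 1))
termination_by s _ => s.length
decreasing_by simp

def distribuicao_alt (lista : List (List String)) (indice : Int) : List (String × Int) :=
  let chaves := PySem.List.sorted
    (lista.map (fun linha => "[ " ++ PySem.List.pyGetD linha indice "" ++ " ]"))
    (fun x => x) false
  (pvRuns chaves PySem.Dict.empty).items

-- ===== PRECONDITION & SPEC =====
-- Pre_ excludes exactly the inputs where Python raises IndexError (linha[indice] out of range for some row)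
def Pre_distribuicao (lista : List (List String)) (indice : Int) : Prop :=
  ∀ linha ∈ lista, PySem.Raise.InRange linha.length indice
instance (lista : List (List String)) (indice : Int) : Decidable (Pre_distribuicao lista indice) := by
  unfold Pre_distribuicao; infer_instance

def pvWitness_distribuicao : List (List String) × Int := ([["2"], ["10"], ["2"]], 0)

def Spec_distribuicao (lista : List (List String)) (indice : Int) (out : List (String × Int)) : Prop := out = distribuicao_alt lista indice
instance (lista : List (List String)) (indice : Int) (out : List (String × Int)) : Decidable (Spec_distribuicao lista indice out) := by unfold Spec_distribuicao; infer_instance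

-- ===== CLAIM (what is proved, stated in full; the proofs are below) =====
def Claim_equal_distribuicao : Prop := ∀ (lista : List (List String)) (indice : Int), Dom_distribuicao lista indice → Pre_distribuicao lista indice → Spec_distribuicao lista indice (distribuicao lista indice)

-- ===== LEMMAS AND PROOFS =====

-- A's counting loop is exactly Counter over the formatted keys
lemma pv_foldA_eq (lista : List (List String)) (indice : Int) :
    lista.foldl
      (fun d linha =>
        let intervalo := "[ " ++ PySem.List.pyGetD linha indice "" ++ " ]"
        if d.contains intervalo then d.insert intervalo (d.getD intervalo 0 + 1)
        else d.insert intervalo 1)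
      PySem.Dict.empty
    = PySem.Dict.counter (lista.map (fun linha => "[ " ++ PySem.List.pyGetD linha indice "" ++ " ]")) := by
  rw [← PySem.Dict.foldl_insert_getD_add_one_eq_counter, List.foldl_map]
  congr 1
  funext d linha
  by_cases h : d.contains ("[ " ++ PySem.List.pyGetD linha indice "" ++ " ]") = true
  · simp [h]
  · have hf : d.contains ("[ " ++ PySem.List.pyGetD linha indice "" ++ " ]") = false :=
      Bool.eq_false_iff.mpr h
    simp [hf, PySem.Dict.getD_of_not_contains d _ hf]

-- insertBy only tests the predicate between the new element and existing ones
lemma pv_insertBy_congr {α : Type} (p q : α → α → Bool) (x : α) :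
    ∀ (ys : List α), (∀ y ∈ ys, p x y = q x y) →
      PySem.List.insertBy p x ys = PySem.List.insertBy q x ys := by
  intro ys
  induction ys with
  | nil => intro _; rfl
  | cons y ys ih =>
    intro h
    rw [show PySem.List.insertBy p x (y :: ys)
          = if p x y then x :: y :: ys else y :: PySem.List.insertBy p x ys from rfl,
        show PySem.List.insertBy q x (y :: ys)
          = if q x y then x :: y :: ys else y :: PySem.List.insertBy q x ys from rfl,
        h y (List.mem_cons_self ..)]
    split
    · rfl
    · rw [ih (fun z hz => h z (List.mem_cons_of_mem _ hz))]

lemma pv_foldl_insertBy_congr {α : Type} (p q : α → α → Bool) (S : List α)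
    (hpq : ∀ a ∈ S, ∀ b ∈ S, p a b = q a b) :
    ∀ (xs acc : List α), (∀ x ∈ xs, x ∈ S) → (∀ x ∈ acc, x ∈ S) →
      xs.foldl (fun acc x => PySem.List.insertBy p x acc) acc
        = xs.foldl (fun acc x => PySem.List.insertBy q x acc) acc := by
  intro xs
  induction xs with
  | nil => intro acc _ _; rfl
  | cons x xs ih =>
    intro acc hxs hacc
    simp only [List.foldl_cons]
    rw [pv_insertBy_congr p q x acc (fun y hy => hpq x (hxs x (List.mem_cons_self ..)) y (hacc y hy))]
    exact ih _ (fun z hz => hxs z (List.mem_cons_of_mem _ hz))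
      (fun z hz => by
        rcases (PySem.List.mem_insertBy _ _ _ _).mp hz with h | h
        · exact h ▸ hxs x (List.mem_cons_self ..)
        · exact hacc z h)

-- when the first components are all distinct, sorting pairs lexicographically is sorting by fst
lemma pv_sorted2_eq_sorted_fst (xs : List (String × Int))
    (h : (xs.map Prod.fst).Nodup) :
    PySem.List.sorted2 xs (fun p => p.1) (fun p => p.2) false
      = PySem.List.sorted xs (fun p => p.1) false := by
  have hinj := List.inj_on_of_nodup_map h
  show xs.foldl (fun acc x => PySem.List.insertBy _ x acc) []
      = xs.foldl (fun acc x => PySem.List.insertBy _ x acc) []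
  apply pv_foldl_insertBy_congr _ _ xs _ xs [] (fun _ h => h) (by simp)
  intro a ha b hb
  by_cases hab : a.1 = b.1
  · have : a = b := hinj ha hb hab
    subst this
    simp
  · rcases lt_or_gt_of_ne hab with h1 | h1
    · simp [h1]
    · simp [h1, asymm h1]

-- ofList is a sublist (first occurrences, in order)
lemma pv_ofList_sublist {α : Type} [BEq α] (xs : List α) :
    (PySem.Set.ofList xs).Sublist xs := by
  induction xs using List.reverseRecOn with
  | nil => simp [PySem.Set.ofList_nil]
  | append_singleton xs x ih =>
    rw [PySem.Set.ofList_append_singleton, PySem.Set.add]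
    split
    · exact ih.trans (List.sublist_append_left _ _)
    · exact List.Sublist.append ih (List.Sublist.refl _)

lemma pv_discard_ofList_append (k : String) :
    ∀ (t r : List String), (∀ x ∈ t, x = k) → k ∉ r →
      (PySem.Set.ofList (t ++ r)).discard k = PySem.Set.ofList r := by
  intro t
  induction t with
  | nil =>
    intro r _ hk
    simp only [List.nil_append, PySem.Set.discard]
    rw [List.filter_eq_self.mpr]
    intro y hy
    have hyr : y ∈ r := (PySem.Set.mem_ofList r y).mp hy
    simp only [Bool.not_eq_eq_eq_not, Bool.not_true, beq_eq_false_iff_ne, ne_eq]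
    exact fun e => hk (e ▸ hyr)
  | cons x t ih =>
    intro r ht hk
    have hx : x = k := ht x (List.mem_cons_self ..)
    subst hx
    rw [List.cons_append, PySem.Set.ofList_cons]
    show ((x :: (PySem.Set.ofList (t ++ r)).discard x).filter (fun y => !(y == x)))
        = PySem.Set.ofList r
    rw [List.filter_cons, if_neg (by simp)]
    show ((PySem.Set.ofList (t ++ r)).filter (fun y => !(y == x))).filter (fun y => !(y == x))
        = PySem.Set.ofList r
    rw [List.filter_filter]
    simp only [Bool.and_self]
    exact ih r (fun y hy => ht y (List.mem_cons_of_mem _ hy)) hk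

-- the run-length loop over a weakly sorted list of keys yields dedup-with-counts
lemma pv_pvRuns_items_aux :
    ∀ (n : Nat) (s : List String) (d : PySem.Dict String Int), s.length ≤ n →
      s.Pairwise (· ≤ ·) → (∀ k ∈ s, d.contains k = false) →
      (pvRuns s d).items
        = d.items ++ (PySem.Set.ofList s).map (fun k => (k, (s.count k : Int))) := by
  intro n
  induction n with
  | zero =>
    intro s d hlen _ _
    have hs : s = [] := List.eq_nil_of_length_eq_zero (Nat.le_zero.mp hlen)
    subst hs
    simp [pvRuns, PySem.Set.ofList_nil]
  | succ m ih =>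
    intro s d hlen hsort hfresh
    cases s with
    | nil => simp [pvRuns, PySem.Set.ofList_nil]
    | cons k resto =>
      have htr : resto = resto.takeWhile (fun x => x == k) ++ resto.dropWhile (fun x => x == k) :=
        (List.takeWhile_append_dropWhile).symm
      set t := resto.takeWhile (fun x => x == k) with ht
      set r := resto.dropWhile (fun x => x == k) with hr
      have hdrop : resto.drop t.length = r := by
        conv_lhs => rw [htr]
        exact List.drop_left
      have hstep : pvRuns (k :: resto) d = pvRuns r (d.insert k ((t.length : Int) + 1)) := by
        rw [pvRuns, hdrop]
      have htk : ∀ x ∈ t, x = k := by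
        intro x hx
        have := List.mem_takeWhile_imp hx
        simpa using this
      have hk_le : ∀ x ∈ resto, k ≤ x := (List.pairwise_cons.mp hsort).1
      have hsort_resto : resto.Pairwise (· ≤ ·) := (List.pairwise_cons.mp hsort).2
      have hsort_r : r.Pairwise (· ≤ ·) := hsort_resto.sublist (List.dropWhile_sublist _)
      have hrsub : r.Sublist resto := List.dropWhile_sublist _
      have hknr : k ∉ r := by
        intro hkr
        cases hrc : r with
        | nil => rw [hrc] at hkr; simp at hkr
        | cons h r' =>
          have hh : (h == k) = false := by
            have hd := List.head?_dropWhile_not (fun x => x == k) resto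
            rw [← hr, hrc] at hd
            simpa using hd
          have hhk : h ≠ k := by simpa using hh
          rw [hrc] at hkr
          rcases List.mem_cons.mp hkr with e | hmem
          · exact hhk e.symm
          · have h1 : h ≤ k := (List.pairwise_cons.mp (hrc ▸ hsort_r)).1 k hmem
            have h2 : k ≤ h := hk_le h (hrsub.subset (hrc ▸ List.mem_cons_self ..))
            exact hhk (le_antisymm h1 h2)
      have hcount_k : (k :: resto).count k = t.length + 1 := by
        rw [List.count_cons_self]
        conv_lhs => rw [htr]
        rw [List.count_append]
        have h1 : t.count k = t.length := List.count_eq_length.mpr (fun b hb => (htk b hb).symm)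
        have h2 : r.count k = 0 := List.count_eq_zero.mpr hknr
        omega
      have hofList : PySem.Set.ofList (k :: resto) = k :: PySem.Set.ofList r := by
        rw [PySem.Set.ofList_cons]
        congr 1
        conv_lhs => rw [htr]
        exact pv_discard_ofList_append k t r htk hknr
      have hcnt' : ∀ x ∈ PySem.Set.ofList r, (k :: resto).count x = r.count x := by
        intro x hx
        have hxr : x ∈ r := (PySem.Set.mem_ofList r x).mp hx
        have hxk : x ≠ k := fun e => hknr (e ▸ hxr)
        rw [List.count_cons_of_ne (Ne.symm hxk)]
        conv_lhs => rw [htr]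
        rw [List.count_append]
        have : t.count x = 0 := List.count_eq_zero.mpr (fun hxt => hxk (htk x hxt))
        omega
      have hfresh' : ∀ x ∈ r, (d.insert k ((t.length : Int) + 1)).contains x = false := by
        intro x hxr
        have hxk : x ≠ k := fun e => hknr (e ▸ hxr)
        rw [PySem.Dict.contains_insert]
        have h1 : (x == k) = false := by simpa using hxk
        have h2 : d.contains x = false :=
          hfresh x (List.mem_cons_of_mem _ (hrsub.subset hxr))
        simp [h1, h2]
      have hlen' : r.length ≤ m := by
        have h1 := hrsub.length_le
        simp at hlen
        omega
      rw [hstep, ih r _ hlen' hsort_r hfresh',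
          PySem.Dict.items_insert_of_not_contains d _ (hfresh k (List.mem_cons_self ..)),
          hofList]
      simp only [List.map_cons, List.append_assoc, List.singleton_append]
      congr 2
      · rw [hcount_k]; push_cast; rfl
      · exact (List.map_congr_left (fun x hx => by rw [hcnt' x hx])).symm

lemma pv_pvRuns_items (s : List String) (hs : s.Pairwise (· ≤ ·)) :
    (pvRuns s PySem.Dict.empty).items
      = (PySem.Set.ofList s).map (fun k => (k, (s.count k : Int))) := by
  have h := pv_pvRuns_items_aux s.length s PySem.Dict.empty le_rfl hs
    (fun k _ => rfl)
  simpa using h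

lemma pv_main (lista : List (List String)) (indice : Int) :
    distribuicao lista indice = distribuicao_alt lista indice := by
  set ks : List String :=
    lista.map (fun linha => "[ " ++ PySem.List.pyGetD linha indice "" ++ " ]") with hks
  set s : List String := PySem.List.sorted ks (fun x => x) false with hs
  -- B side
  have hsort_s : s.Pairwise (· ≤ ·) := PySem.List.sorted_pairwise ks (fun x => x)
  have hB : distribuicao_alt lista indice
      = (PySem.Set.ofList s).map (fun k => (k, (s.count k : Int))) := by
    simp only [distribuicao_alt]
    exact pv_pvRuns_items s hsort_s
  -- A side
  have hnodup : (((PySem.Dict.counter ks).items).map Prod.fst).Nodup := by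
    have := PySem.Dict.nodup_keys_counter ks
    simpa [PySem.Dict.keys] using this
  have hA : distribuicao lista indice
      = (PySem.List.sorted (PySem.Set.ofList ks) (fun x => x)).map
          (fun k => (k, (ks.count k : Int))) := by
    simp only [distribuicao, pv_foldA_eq lista indice, ← hks]
    rw [pv_sorted2_eq_sorted_fst _ hnodup]
    apply PySem.List.sorted_eq_of_perm_of_pairwise_lt
    · rw [PySem.Dict.items_counter]
      exact (PySem.List.sorted_perm (PySem.Set.ofList ks) (fun x => x) false).map _
    · have := PySem.List.sorted_ofList_pairwise_lt ks
      simpa [List.pairwise_map] using this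
  -- link: sorted(set(ks)) = ofList of the sorted key list
  have hnod1 : (PySem.Set.ofList ks).Nodup := PySem.Set.nodup_ofList ks
  have hnod2 : (PySem.Set.ofList s).Nodup := PySem.Set.nodup_ofList s
  have hperm : (PySem.Set.ofList s).Perm (PySem.Set.ofList ks) := by
    rw [List.perm_ext_iff_of_nodup hnod2 hnod1]
    intro a
    rw [PySem.Set.mem_ofList, PySem.Set.mem_ofList, hs, PySem.List.mem_sorted]
  have hlt : (PySem.Set.ofList s).Pairwise (· < ·) := by
    have hle : (PySem.Set.ofList s).Pairwise (· ≤ ·) :=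
      hsort_s.sublist (pv_ofList_sublist s)
    have hne : (PySem.Set.ofList s).Pairwise (· ≠ ·) := hnod2
    exact (hle.and hne).imp (fun h => lt_of_le_of_ne h.1 h.2)
  have hD : PySem.List.sorted (PySem.Set.ofList ks) (fun x => x) = PySem.Set.ofList s :=
    PySem.List.sorted_eq_of_perm_of_pairwise_lt _ _ _ hperm hlt
  have hcnt : ∀ k : String, ks.count k = s.count k :=
    fun k => ((PySem.List.sorted_perm ks (fun x => x) false).count_eq k).symm
  rw [hA, hB, hD]
  exact List.map_congr_left (fun k _ => by rw [hcnt k])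

-- ===== VERDICT (by name: the statement is the Claim_ definition above) =====
theorem distribuicao_spec : Claim_equal_distribuicao := by
  intro lista indice _ _
  unfold Spec_distribuicao
  exact pv_main lista indice
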